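-- pv_equiv track=rewrite | github.com/sbsmirnoff/templie | src/templie/query_compiler.py | dict_row_constructor
-- ===== SOURCE A (Python) =====
-- from itertools import groupby
--
-- def _group_name_value_pairs(pairs):
--     def key(pair):
--         return pair[0].split('.')[1]
--     pairs.sort(key=key)
--     return groupby(pairs, key=key)
--
-- def dict_row_constructor(row):
--     pairs = [
--         ('{}.{}'.format(table, column_name), value)
--         for table, columns in row.items()
--         for column_name, value in columns.items()
--     ]
--     grouped = _group_name_value_pairs(pairs)
--     result = {}
--     for key, values in grouped:
--         values = list(values)
--         if len(values) == 1:
--             result[key] = values[0][1]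
--             result[values[0][0]] = values[0][1]
--         else:
--             result.update(dict(values))
--     return result
-- ===== SOURCE B (Python) =====
-- def dict_row_constructor(row):
--     def key(full):
--         return full.split('.')[1]
--     pairs = [
--         ('{}.{}'.format(table, column_name), value)
--         for table, columns in row.items()
--         for column_name, value in columns.items()
--     ]
--     counts = {}
--     for full, _ in pairs:
--         counts[key(full)] = counts.get(key(full), 0) + 1
--     result = {}
--     for full, value in sorted(pairs, key=lambda p: key(p[0])):
--         if counts[key(full)] == 1:
--             result[key(full)] = value
--         result[full] = value
--     return result
-- ===== Notes on version B (the rewrite author's own statement) =====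
-- stated objective: alternative
-- what changed: B never forms groups at all: it counts key multiplicities in one pass, then emits entries in a single flat scan over the sorted pairs with a per-pair branch, instead of A's materialise-each-group-and-branch-on-its-length via itertools.groupby.
import Mathlib
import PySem

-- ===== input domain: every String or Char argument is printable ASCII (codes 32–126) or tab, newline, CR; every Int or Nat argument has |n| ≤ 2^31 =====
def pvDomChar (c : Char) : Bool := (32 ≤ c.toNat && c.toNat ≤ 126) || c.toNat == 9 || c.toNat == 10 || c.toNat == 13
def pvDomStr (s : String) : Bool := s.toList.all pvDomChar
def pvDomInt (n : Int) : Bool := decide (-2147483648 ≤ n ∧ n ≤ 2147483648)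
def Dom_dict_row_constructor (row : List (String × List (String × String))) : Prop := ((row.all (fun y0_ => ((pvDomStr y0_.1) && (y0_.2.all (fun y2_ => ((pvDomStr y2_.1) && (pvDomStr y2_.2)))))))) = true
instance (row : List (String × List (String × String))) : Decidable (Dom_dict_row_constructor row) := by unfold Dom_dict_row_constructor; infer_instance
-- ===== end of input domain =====

-- B drops A's grouping entirely: a counting pass over the keys, then one flat scan of the
-- sorted pairs emitting per pair (objective: alternative, same asymptotic cost).

-- ===== PORT A =====

-- '{}.{}'.format(table, column_name)  (both Pythons build the same dotted name)
def pvFmt (t c : String) : String := t ++ "." ++ c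

-- full.split('.')[1]; every string it is applied to contains '.', so index 1 exists
-- (the .getD fallbacks are never reached on such strings)
def pvKey (s : String) : String :=
  (PySem.List.pyGet? ((PySem.Str.split? s ".").getD []) 1).getD ""

-- itertools.groupby(sorted_pairs, key): consecutive runs of equal key, materialised
-- in order exactly as A's 'for key, values in grouped: values = list(values)' consumes them
def pvGroupRuns : List (String × String) → List (String × List (String × String))
  | [] => []
  | p :: rest =>
      (pvKey p.1, p :: rest.takeWhile (fun q => pvKey q.1 == pvKey p.1)) ::
        pvGroupRuns (rest.dropWhile (fun q => pvKey q.1 == pvKey p.1))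
  termination_by l => l.length
  decreasing_by
    simpa using Nat.lt_succ_of_le (List.length_dropWhile_le _ _)

-- A's loop body: len(values)==1 branch, else result.update(dict(values))
-- (updating with dict(values) inserts the pairs of values in order: Dict.update)
def pvStepA (result : PySem.Dict String String) (kv : String × List (String × String)) :
    PySem.Dict String String :=
  if kv.2.length == 1 then
    let p := (PySem.List.pyGet? kv.2 0).getD ("", "")   -- values[0]; the branch guarantees it exists
    (result.insert kv.1 p.2).insert p.1 p.2
  else
    result.update kv.2

def dict_row_constructor (row : List (String × List (String × String))) : List (String × String) :=
  let pairs := row.flatMap (fun tc => tc.2.map (fun cv => (pvFmt tc.1 cv.1, cv.2)))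
  let grouped := pvGroupRuns (PySem.List.sorted pairs (fun p => pvKey p.1) false)
  (grouped.foldl pvStepA PySem.Dict.empty).items

-- ===== PORT B =====

-- B's emit step: 'if counts[key(full)] == 1: result[key] = value; result[full] = value'
-- (counts[k] always exists here, since k comes from a pair of the same list; .getD 0 is never the fallback)
def pvStepB (counts : PySem.Dict String Int)
    (result : PySem.Dict String String) (p : String × String) : PySem.Dict String String :=
  let r := if counts.getD (pvKey p.1) 0 == 1 then result.insert (pvKey p.1) p.2 else result
  r.insert p.1 p.2

def dict_row_constructor_alt (row : List (String × List (String × String))) : List (String × String) :=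
  let pairs := row.flatMap (fun tc => tc.2.map (fun cv => (pvFmt tc.1 cv.1, cv.2)))
  -- counts[key(full)] = counts.get(key(full), 0) + 1
  let counts := pairs.foldl (fun c p => c.insert (pvKey p.1) (c.getD (pvKey p.1) 0 + 1))
    PySem.Dict.empty
  ((PySem.List.sorted pairs (fun p => pvKey p.1) false).foldl (pvStepB counts)
    PySem.Dict.empty).items

-- ===== PRECONDITION & SPEC =====
def Spec_dict_row_constructor (row : List (String × List (String × String))) (out : List (String × String)) : Prop := out = dict_row_constructor_alt row
instance (row : List (String × List (String × String))) (out : List (String × String)) : Decidable (Spec_dict_row_constructor row out) := by unfold Spec_dict_row_constructor; infer_instance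

-- ===== CLAIM (what is proved, stated in full; the proofs are below) =====
def Claim_equal_dict_row_constructor : Prop := ∀ (row : List (String × List (String × String))), Dom_dict_row_constructor row → Spec_dict_row_constructor row (dict_row_constructor row)

-- ===== LEMMAS AND PROOFS =====

-- the key of a pair, as both programs compute it
def pvKf (p : String × String) : String := pvKey p.1

-- ---- stability of the insertion sort w.r.t. the key classes ----

theorem pv_insertBy_filter (kf : String × String → String) (k : String)
    (x : String × String) (acc : List (String × String))
    (hacc : acc.Pairwise (fun a b => kf a ≤ kf b)) :
    (PySem.List.insertBy (fun a b => decide (kf a < kf b)) x acc).filter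
        (fun p => kf p == k) =
      acc.filter (fun p => kf p == k) ++ (if kf x == k then [x] else []) := by
  induction acc with
  | nil => by_cases hk : (kf x == k) = true <;> simp [PySem.List.insertBy, hk]
  | cons y ys ih =>
    rw [List.pairwise_cons] at hacc
    by_cases hb : kf x < kf y
    · -- x is inserted in front; no element of y :: ys can have key k when kf x = k
      have hins : PySem.List.insertBy (fun a b => decide (kf a < kf b)) x (y :: ys)
          = x :: y :: ys := by simp [PySem.List.insertBy, hb]
      rw [hins]
      by_cases hk : (kf x == k) = true
      · have hxk : kf x = k := by simpa using hk
        have hnone : ∀ q ∈ y :: ys, ¬ (kf q == k) = true := by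
          intro q hq
          have : kf y ≤ kf q := by
            rcases hq with _ | hq
            · exact le_refl _
            · exact hacc.1 _ (by assumption)
          simp only [beq_iff_eq]
          intro h; rw [h, ← hxk] at this; exact absurd (lt_of_lt_of_le hb this) (lt_irrefl _)
        rw [List.filter_cons, List.filter_eq_nil_iff.mpr hnone]
        simp [hk]
      · rw [List.filter_cons]
        simp [hk]
    · have hins : PySem.List.insertBy (fun a b => decide (kf a < kf b)) x (y :: ys)
          = y :: PySem.List.insertBy (fun a b => decide (kf a < kf b)) x ys := by
        simp [PySem.List.insertBy, hb]
      rw [hins, List.filter_cons, List.filter_cons, ih hacc.2]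
      by_cases hy : (kf y == k) = true <;> simp [hy]

-- the stable sort preserves each key class in input order
theorem pv_sorted_filter (pairs : List (String × String)) (kf : String × String → String)
    (k : String) :
    (PySem.List.sorted pairs kf false).filter (fun p => kf p == k) =
      pairs.filter (fun p => kf p == k) := by
  induction pairs using List.reverseRecOn with
  | nil => simp [PySem.List.sorted]
  | append_singleton l x ih =>
    rw [PySem.List.sorted_eq_foldl_insertBy, List.foldl_append, List.foldl_cons, List.foldl_nil,
        ← PySem.List.sorted_eq_foldl_insertBy]
    rw [pv_insertBy_filter kf k x _ (PySem.List.sorted_pairwise l kf), ih, List.filter_append]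
    by_cases hx : kf x == k <;> simp [hx]

-- ---- a ≤-sorted list is the concatenation of its key classes, in key order ----

theorem pv_split_min (kf : String × String → String) (k : String) :
    ∀ S : List (String × String), S.Pairwise (fun a b => kf a ≤ kf b) →
      (∀ p ∈ S, k ≤ kf p) →
      S = S.filter (fun p => kf p == k) ++ S.filter (fun p => !(kf p == k)) := by
  intro S
  induction S with
  | nil => simp
  | cons x S' ih =>
    intro hp hmin
    rw [List.pairwise_cons] at hp
    by_cases hx : (kf x == k) = true
    · have hrec := ih hp.2 (fun p hp' => hmin p (List.mem_cons_of_mem _ hp'))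
      rw [List.filter_cons, List.filter_cons]
      simp only [hx, Bool.not_true, if_true, Bool.false_eq_true, if_false]
      rw [List.cons_append]
      exact congrArg _ hrec
    · have hgt : k < kf x := lt_of_le_of_ne (hmin x List.mem_cons_self) (fun h => hx (beq_iff_eq.mpr h.symm))
      have hnone : ∀ q ∈ x :: S', ¬ (kf q == k) = true := by
        intro q hq
        have : kf x ≤ kf q := by
          rcases hq with _ | hq
          · exact le_refl _
          · exact hp.1 _ (by assumption)
        simp only [beq_iff_eq]; intro h
        rw [h] at this; exact absurd (lt_of_lt_of_le hgt this) (lt_irrefl _)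
      rw [List.filter_eq_nil_iff.mpr hnone, List.nil_append,
          List.filter_eq_self.mpr (by
            intro q hq
            cases h' : (kf q == k) with
            | true => exact absurd h' (hnone q hq)
            | false => rfl)]

theorem pv_sorted_decomp (kf : String × String → String) :
    ∀ (ks : List String) (S : List (String × String)),
      S.Pairwise (fun a b => kf a ≤ kf b) →
      ks.Pairwise (· < ·) →
      (∀ k, k ∈ ks ↔ ∃ p ∈ S, kf p = k) →
      S = ks.flatMap (fun k => S.filter (fun p => kf p == k)) := by
  intro ks
  induction ks with
  | nil =>
    intro S _ _ hmem
    cases S with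
    | nil => simp
    | cons p S' => exact absurd ((hmem (kf p)).mpr ⟨p, List.mem_cons_self, rfl⟩) (by simp)
  | cons k ks' ih =>
    intro S hS hks hmem
    rw [List.pairwise_cons] at hks
    have hmin : ∀ p ∈ S, k ≤ kf p := by
      intro p hp
      rcases (hmem (kf p)).mpr ⟨p, hp, rfl⟩ with h | h
      · exact le_refl _
      · exact le_of_lt (hks.1 _ (by assumption))
    have hsplit := pv_split_min kf k S hS hmin
    set B := S.filter (fun p => !(kf p == k)) with hB
    have hBpair : B.Pairwise (fun a b => kf a ≤ kf b) := hS.sublist (List.filter_sublist)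
    have hBmem : ∀ k', k' ∈ ks' ↔ ∃ p ∈ B, kf p = k' := by
      intro k'
      constructor
      · intro hk'
        rcases (hmem k').mp (List.mem_cons_of_mem _ hk') with ⟨p, hp, hkp⟩
        refine ⟨p, ?_, hkp⟩
        rw [hB, List.mem_filter]
        refine ⟨hp, ?_⟩
        have : k ≠ k' := ne_of_lt (hks.1 _ hk')
        simp [hkp, this.symm]
      · rintro ⟨p, hp, hkp⟩
        rw [hB, List.mem_filter] at hp
        have hk' : k' ∈ k :: ks' := (hmem k').mpr ⟨p, hp.1, hkp⟩
        rcases List.mem_cons.mp hk' with h | h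
        · exfalso
          apply absurd hp.2
          simp [hkp, h]
        · exact h
    have hrec := ih B hBpair hks.2 hBmem
    rw [List.flatMap_cons]
    have hfix : ∀ k' ∈ ks', B.filter (fun p => kf p == k') = S.filter (fun p => kf p == k') := by
      intro k' hk'
      rw [hB, List.filter_filter]
      apply List.filter_congr
      intro p _
      have : k ≠ k' := ne_of_lt (hks.1 _ hk')
      by_cases h : kf p = k' <;> simp [h, this.symm]
    calc S = S.filter (fun p => kf p == k) ++ B := hsplit
    _ = S.filter (fun p => kf p == k) ++ ks'.flatMap (fun k' => B.filter (fun p => kf p == k')) := by rw [← hrec]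
    _ = S.filter (fun p => kf p == k) ++ ks'.flatMap (fun k' => S.filter (fun p => kf p == k')) := by
        congr 1; exact List.flatMap_congr (fun k' hk' => hfix k' hk')

-- ---- groupRuns of a concatenation of nonempty single-key buckets ----

theorem pv_takeWhile_dropWhile_append (p : (String × String) → Bool)
    (xs ys : List (String × String))
    (h1 : ∀ x ∈ xs, p x = true) (h2 : ∀ y ∈ ys, p y = false) :
    (xs ++ ys).takeWhile p = xs ∧ (xs ++ ys).dropWhile p = ys := by
  induction xs with
  | nil =>
    simp only [List.nil_append]
    cases ys with
    | nil => simp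
    | cons y ys' =>
      rw [List.takeWhile_cons, List.dropWhile_cons, h2 y List.mem_cons_self]
      simp
  | cons x xs' ih =>
    rw [List.cons_append, List.takeWhile_cons, List.dropWhile_cons, h1 x List.mem_cons_self]
    have := ih (fun x hx => h1 x (List.mem_cons_of_mem _ hx))
    simp [this.1, this.2]

theorem pv_groupRuns_flatMap :
    ∀ (ks : List String) (b : String → List (String × String)),
      ks.Pairwise (· ≠ ·) →
      (∀ k ∈ ks, b k ≠ []) →
      (∀ k ∈ ks, ∀ p ∈ b k, pvKey p.1 = k) →
      pvGroupRuns (ks.flatMap b) = ks.map (fun k => (k, b k)) := by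
  intro ks
  induction ks with
  | nil => intro b _ _ _; simp [pvGroupRuns]
  | cons k ks' ih =>
    intro b hne hnil hkey
    rw [List.pairwise_cons] at hne
    rcases hbk : b k with _ | ⟨p, bk⟩
    · exact absurd hbk (hnil k List.mem_cons_self)
    have hkp : pvKey p.1 = k := hkey k List.mem_cons_self p (by rw [hbk]; exact List.mem_cons_self)
    have hall : ∀ q ∈ bk, (pvKey q.1 == pvKey p.1) = true := by
      intro q hq
      have := hkey k List.mem_cons_self q (by rw [hbk]; exact List.mem_cons_of_mem _ hq)
      simp [this, hkp]
    have hrest : ∀ q ∈ ks'.flatMap b, (pvKey q.1 == pvKey p.1) = false := by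
      intro q hq
      rw [List.mem_flatMap] at hq
      rcases hq with ⟨k', hk', hq⟩
      have := hkey k' (List.mem_cons_of_mem _ hk') q hq
      simp [this, hkp]
      exact fun h => absurd h.symm (hne.1 _ hk')
    have htd := pv_takeWhile_dropWhile_append (fun q => pvKey q.1 == pvKey p.1) bk
      (ks'.flatMap b) hall hrest
    rw [List.flatMap_cons, hbk, List.cons_append, pvGroupRuns, htd.1, htd.2, hkp]
    rw [List.map_cons, ← hbk,
        ih b hne.2 (fun k' h => hnil k' (List.mem_cons_of_mem _ h))
          (fun k' h => hkey k' (List.mem_cons_of_mem _ h))]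

-- ---- B's counter dict, characterised ----

-- the common flat list of (dotted name, value) pairs
def pvPairs (row : List (String × List (String × String))) : List (String × String) :=
  row.flatMap (fun tc => tc.2.map (fun cv => (pvFmt tc.1 cv.1, cv.2)))

def pvCounts (row : List (String × List (String × String))) : PySem.Dict String Int :=
  (pvPairs row).foldl (fun c p => c.insert (pvKey p.1) (c.getD (pvKey p.1) 0 + 1))
    PySem.Dict.empty

-- B's counting loop, characterised: the count of a key is its multiplicity among the pair keys
theorem pv_counts_getD_gen (l : List (String × String)) (d : PySem.Dict String Int) (k : String) :
    (l.foldl (fun c p => c.insert (pvKey p.1) (c.getD (pvKey p.1) 0 + 1)) d).getD k 0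
      = d.getD k 0 + ((l.map pvKf).count k : Int) := by
  induction l generalizing d with
  | nil => simp
  | cons p rest ih =>
    rw [List.foldl_cons, ih, PySem.Dict.getD_insert, List.map_cons, List.count_cons]
    by_cases h : k = pvKey p.1
    · simp only [h, if_true]
      have : (pvKf p == pvKey p.1) = true := by simp [pvKf]
      rw [this]
      simp
      ring
    · simp only [h, if_false]
      have : (pvKf p == k) = false := by
        simp only [pvKf, beq_eq_false_iff_ne]
        exact fun hc => h hc.symm
      rw [this]
      simp

theorem pv_counts_getD (row : List (String × List (String × String))) (k : String) :
    (pvCounts row).getD k 0 = (((pvPairs row).map pvKf).count k : Int) := by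
  rw [pvCounts, pv_counts_getD_gen, PySem.Dict.getD_empty]
  ring

-- count of a key = length of its filter class
theorem pv_count_eq_filter_length (l : List (String × String)) (k : String) :
    (l.map pvKf).count k = (l.filter (fun p => pvKf p == k)).length := by
  rw [List.count_eq_countP, List.countP_map, List.countP_eq_length_filter]
  rfl

-- folding B's step over one single-key bucket = A's per-group step
theorem pv_bucket_fold (counts : PySem.Dict String Int) (k : String)
    (bucket : List (String × String)) (r : PySem.Dict String String)
    (hne : bucket ≠ [])
    (hk : ∀ p ∈ bucket, pvKey p.1 = k)
    (hcnt : counts.getD k 0 = (bucket.length : Int)) :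
    bucket.foldl (pvStepB counts) r = pvStepA r (k, bucket) := by
  rcases bucket with _ | ⟨p, rest⟩
  · exact absurd rfl hne
  rcases rest with _ | ⟨q, rest'⟩
  · -- single element: count is 1
    have hkp := hk p List.mem_cons_self
    simp only [List.foldl_cons, List.foldl_nil, pvStepB, pvStepA, hkp, hcnt]
    simp [PySem.List.pyGet?, PySem.List.pyIdx?]
  · -- length ≥ 2: count ≠ 1, every step is a plain insert
    have hcnt2 : (counts.getD k 0 == 1) = false := by
      rw [hcnt]; simp; omega
    have hgen : ∀ (b : List (String × String)) (r' : PySem.Dict String String),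
        (∀ x ∈ b, pvKey x.1 = k) →
        b.foldl (pvStepB counts) r' = b.foldl (fun d x => d.insert x.1 x.2) r' := by
      intro b
      induction b with
      | nil => intro r' _; rfl
      | cons x xs ih =>
        intro r' hx
        rw [List.foldl_cons, List.foldl_cons, ← ih _ (fun y hy => hx y (List.mem_cons_of_mem _ hy))]
        congr 1
        simp only [pvStepB, hx x List.mem_cons_self, hcnt2]
        simp
    rw [hgen _ r hk]
    simp only [pvStepA]
    have hlen : ((p :: q :: rest').length == 1) = false := by simp
    rw [hlen]
    rfl

-- ---- main theorem ----

theorem pv_main (row : List (String × List (String × String))) :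
    dict_row_constructor row = dict_row_constructor_alt row := by
  show ((pvGroupRuns (PySem.List.sorted (pvPairs row) (fun p => pvKey p.1) false)).foldl
          pvStepA PySem.Dict.empty).items
      = ((PySem.List.sorted (pvPairs row) (fun p => pvKey p.1) false).foldl
          (pvStepB (pvCounts row)) PySem.Dict.empty).items
  set pairs := pvPairs row with hpairs
  set S := PySem.List.sorted pairs (fun p => pvKey p.1) false with hS
  have hSpair : S.Pairwise (fun a b => pvKf a ≤ pvKf b) := PySem.List.sorted_pairwise pairs _
  have hSmem : ∀ p, p ∈ S ↔ p ∈ pairs := fun p => PySem.List.mem_sorted pairs _ false p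
  -- distinct keys in sorted order
  set ks := PySem.List.sorted (PySem.Set.ofList (pairs.map pvKf)) (fun x => x) false with hks
  have hklt : ks.Pairwise (· < ·) := PySem.List.sorted_ofList_pairwise_lt _
  have hmemks : ∀ k, k ∈ ks ↔ k ∈ pairs.map pvKf := by
    intro k
    rw [hks, PySem.List.mem_sorted, PySem.Set.mem_ofList]
  have hdecomp : S = ks.flatMap (fun k => S.filter (fun p => pvKf p == k)) := by
    apply pv_sorted_decomp pvKf ks S hSpair hklt
    intro k
    rw [hmemks k, List.mem_map]
    constructor
    · rintro ⟨p, hp, h⟩; exact ⟨p, (hSmem p).mpr hp, h⟩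
    · rintro ⟨p, hp, h⟩; exact ⟨p, (hSmem p).mp hp, h⟩
  have hstab : ∀ k, S.filter (fun p => pvKf p == k) = pairs.filter (fun p => pvKf p == k) := by
    intro k; exact pv_sorted_filter pairs pvKf k
  have hbne : ∀ k ∈ ks, S.filter (fun p => pvKf p == k) ≠ [] := by
    intro k hk
    rcases List.mem_map.mp ((hmemks k).mp hk) with ⟨p, hp, hkp⟩
    intro hnil
    have : p ∈ S.filter (fun p => pvKf p == k) := by
      rw [List.mem_filter]; exact ⟨(hSmem p).mpr hp, by simp [hkp]⟩
    rw [hnil] at this; exact absurd this (List.not_mem_nil)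
  have hbk : ∀ k ∈ ks, ∀ p ∈ S.filter (fun p => pvKf p == k), pvKey p.1 = k := by
    intro k _ p hp
    rw [List.mem_filter] at hp
    simpa [pvKf] using hp.2
  -- the counter holds each bucket's length
  have hcnt : ∀ k ∈ ks, (pvCounts row).getD k 0
      = ((S.filter (fun p => pvKf p == k)).length : Int) := by
    intro k _
    rw [pv_counts_getD, hstab k, pv_count_eq_filter_length]
  -- A side: groupRuns gives one run per distinct key
  have hgr : pvGroupRuns S = ks.map (fun k => (k, S.filter (fun p => pvKf p == k))) := by
    conv_lhs => rw [hdecomp]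
    exact pv_groupRuns_flatMap ks _ (hklt.imp ne_of_lt) hbne hbk
  -- B side: the flat fold splits into one fold per bucket
  have hBside : (S.foldl (pvStepB (pvCounts row)) PySem.Dict.empty)
      = ks.foldl (fun r k => (S.filter (fun p => pvKf p == k)).foldl (pvStepB (pvCounts row)) r)
          PySem.Dict.empty := by
    conv_lhs => rw [hdecomp]
    rw [List.foldl_flatMap]
  congr 1
  rw [hgr, hBside, List.foldl_map]
  apply PySem.List.foldl_congr_mem
  intro r k hk
  exact (pv_bucket_fold (pvCounts row) k _ r (hbne k hk) (hbk k hk) (hcnt k hk)).symm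

-- ===== VERDICT (by name: the statement is the Claim_ definition above) =====
theorem dict_row_constructor_spec : Claim_equal_dict_row_constructor := by
  intro row _
  unfold Spec_dict_row_constructor
  exact pv_main row
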